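-- pv_equiv track=rewrite | github.com/sungyeong98/programmers | 프로그래머스/3/77886. 110 옮기기/110 옮기기.py | solution
-- ===== SOURCE A (Python) =====
-- def solution(s):
--     answer = []
--     for i in s:
--         temp=[]
--         cnt,idx=0,-1
--         for j in i:
--             temp.append(j)
--             while len(temp)>2 and temp[-1]=='0' and temp[-2]=='1' and temp[-3]=='1':
--                 cnt+=1
--                 temp.pop()
--                 temp.pop()
--                 temp.pop()
--         for k in range(len(temp)-1,-1,-1):
--             if temp[k]=='0':
--                 idx=k+1
--                 break
--         else:
--             answer.append('110'*cnt+''.join(temp))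
--             continue
--         a=''.join(temp)
--         answer.append(a[:idx]+'110'*cnt+a[idx:])
--     return answer
-- ===== SOURCE B (Python) =====
-- def solution(s):
--     answer = []
--     for i in s:
--         cnt = 0
--         while '110' in i:
--             new = i.replace('110', '')
--             cnt += (len(i) - len(new)) // 3
--             i = new
--         p = i.rfind('0') + 1
--         answer.append(i[:p] + '110' * cnt + i[p:])
--     return answer
-- ===== Notes on version B (the rewrite author's own statement) =====
-- stated objective: idiomatic
-- what changed: A simulates a character stack (append, pop three on every '1','1','0' top, counting pops) and scans indices downward for the last '0'; B instead reduces each string by iterating i.replace('110','') to a fixpoint, derives the count from the total length drop divided by 3, and splices '110'*cnt after i.rfind('0').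
import Mathlib
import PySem

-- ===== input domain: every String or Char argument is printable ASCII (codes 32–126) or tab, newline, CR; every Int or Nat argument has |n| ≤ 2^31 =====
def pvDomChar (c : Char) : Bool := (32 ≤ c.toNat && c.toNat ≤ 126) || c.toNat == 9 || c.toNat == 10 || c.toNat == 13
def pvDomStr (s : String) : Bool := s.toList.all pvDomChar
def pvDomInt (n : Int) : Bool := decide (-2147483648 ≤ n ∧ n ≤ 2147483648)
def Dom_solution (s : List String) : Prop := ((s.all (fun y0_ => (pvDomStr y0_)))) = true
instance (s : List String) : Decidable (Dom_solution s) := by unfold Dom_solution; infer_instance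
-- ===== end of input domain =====

-- B replaces A's char-by-char stack reduction by an iterated str.replace('110','') fixpoint
-- with the count taken from the total length drop, and A's reverse index scan by str.rfind('0').

-- ===== PORT A =====
-- the inner `while` of A: pop three chars while the stack top reads '1','1','0'
def popWhileA (t : List Char) (cnt : Int) : List Char × Int :=
  if h : 2 < t.length ∧ PySem.List.pyGet? t (-1) = some '0'
      ∧ PySem.List.pyGet? t (-2) = some '1' ∧ PySem.List.pyGet? t (-3) = some '1' then
    popWhileA t.dropLast.dropLast.dropLast (cnt + 1)
  else (t, cnt)
termination_by t.length
decreasing_by simp only [List.length_dropLast]; omega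

-- A's `for k in range(len(temp)-1,-1,-1)` with break/else: first k (scanning down) with temp[k]=='0'
def find0A (t : List Char) : List Int → Option Int
  | [] => none
  | k :: ks => if PySem.List.pyGet? t k = some '0' then some (k + 1) else find0A t ks

-- tail of A's loop body: the break branch builds a[:idx]+'110'*cnt+a[idx:], the for-else
-- branch builds '110'*cnt+''.join(temp)  (''.join over single chars is String.ofList)
def spliceA (temp : List Char) (cnt : Int) : String :=
  match find0A temp (PySem.List.pyRange ((temp.length : Int) - 1) (-1) (-1)) with
  | none => String.ofList (PySem.List.pyRepeat ['1','1','0'] cnt ++ temp)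
  | some idx =>
      String.ofList (PySem.List.slice temp none (some idx)
        ++ PySem.List.pyRepeat ['1','1','0'] cnt ++ PySem.List.slice temp (some idx) none)

-- one iteration of A's `for i in s` loop
def processA (i : String) : String :=
  let st := i.toList.foldl (fun tc j => popWhileA (tc.1 ++ [j]) tc.2) (([] : List Char), (0 : Int))
  spliceA st.1 st.2

def solution (s : List String) : List String :=
  s.foldl (fun answer i => answer ++ [processA i]) []

-- ===== PORT B =====
-- helpers needed so that B's `while '110' in i` loop terminates: `rep` is a spec-level
-- description of one replace('110','') pass, used to show replace shrinks the string
def rep : List Char → List Char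
  | [] => []
  | c :: t =>
      if ['1','1','0'] <+: (c :: t) then rep ((c :: t).drop 3) else c :: rep t
termination_by l => l.length
decreasing_by all_goals (simp only [List.length_drop, List.length_cons]; omega)

theorem replace_go_eq_rep : ∀ (fuel : Nat) (l acc : List Char), l.length ≤ fuel →
    PySem.Chars.replace.go ['1','1','0'] [] fuel l acc = acc.reverse ++ rep l := by
  intro fuel
  induction fuel with
  | zero =>
    intro l acc h
    have : l = [] := List.eq_nil_of_length_eq_zero (by omega)
    subst this
    simp [PySem.Chars.replace.go, rep]
  | succ n ih =>
    intro l acc h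
    match l with
    | [] => simp [PySem.Chars.replace.go, rep]
    | c :: t =>
      by_cases hb : ['1','1','0'].isPrefixOf (c :: t) = true
      · have hp : ['1','1','0'] <+: (c :: t) := List.isPrefixOf_iff_prefix.mp hb
        simp only [PySem.Chars.replace.go, hb, if_true]
        rw [ih _ _ (by simp at h ⊢; omega)]
        rw [rep, if_pos hp]
        simp
      · have hp : ¬ ['1','1','0'] <+: (c :: t) := fun hh => hb (List.isPrefixOf_iff_prefix.mpr hh)
        simp only [PySem.Chars.replace.go, hb, if_false, Bool.false_eq_true]
        rw [ih _ _ (by simp at h ⊢; omega)]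
        rw [rep, if_neg hp]
        simp

theorem replace110_eq_rep (l : List Char) :
    PySem.Chars.replace l ['1','1','0'] [] = rep l := by
  unfold PySem.Chars.replace
  rw [if_neg (by simp)]
  exact replace_go_eq_rep l.length l [] le_rfl

theorem rep_length_le (l : List Char) : (rep l).length ≤ l.length := by
  induction l using rep.induct with
  | case1 => simp [rep]
  | case2 c t h ih => rw [rep, if_pos h]; simp at ih ⊢; omega
  | case3 c t h ih => rw [rep, if_neg h]; simp; omega

theorem rep_length_lt (l : List Char) (h : ['1','1','0'] <:+: l) :
    (rep l).length < l.length := by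
  induction l using rep.induct with
  | case1 => simp at h
  | case2 c t hp ih =>
    rw [rep, if_pos hp]
    have := rep_length_le ((c :: t).drop 3)
    simp at this ⊢
    omega
  | case3 c t hp ih =>
    rw [rep, if_neg hp]
    rcases h with ⟨a, b, hab⟩
    match a, hab with
    | [], hab => exact absurd ⟨b, by simpa using hab⟩ hp
    | x :: a, hab =>
      simp only [List.cons_append] at hab
      have ht : ['1','1','0'] <:+: t := ⟨a, b, (List.cons_eq_cons.mp hab).2⟩
      simp only [List.length_cons]
      exact Nat.succ_lt_succ (ih ht)

theorem replace110_lt (l : List Char) (h : PySem.Chars.isIn ['1','1','0'] l = true) :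
    (PySem.Chars.replace l ['1','1','0'] []).length < l.length := by
  rw [replace110_eq_rep]
  exact rep_length_lt l ((PySem.Chars.isIn_iff_infix _ _).mp h)

-- B's `while '110' in i` loop: i = i.replace('110',''), cnt += (len drop)//3
def loopB (l : List Char) (cnt : Int) : List Char × Int :=
  if h : PySem.Chars.isIn ['1','1','0'] l = true then
    let nw := PySem.Chars.replace l ['1','1','0'] []
    loopB nw (cnt + PySem.Int.floordiv ((l.length : Int) - (nw.length : Int)) 3)
  else (l, cnt)
termination_by l.length
decreasing_by exact replace110_lt l h

-- tail of B's loop body: p = i.rfind('0') + 1; i[:p] + '110'*cnt + i[p:]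
def spliceB (l : List Char) (cnt : Int) : String :=
  let p := PySem.Chars.rfind l ['0'] + 1
  String.ofList (PySem.List.slice l none (some p)
    ++ PySem.List.pyRepeat ['1','1','0'] cnt ++ PySem.List.slice l (some p) none)

-- one iteration of B's `for i in s` loop
def processB (i : String) : String :=
  let st := loopB i.toList 0
  spliceB st.1 st.2

def solution_alt (s : List String) : List String :=
  s.foldl (fun answer i => answer ++ [processB i]) []

-- ===== PRECONDITION & SPEC =====
def Spec_solution (s : List String) (out : List String) : Prop := out = solution_alt s
instance (s : List String) (out : List String) : Decidable (Spec_solution s out) := by unfold Spec_solution; infer_instance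

-- ===== CLAIM (what is proved, stated in full; the proofs are below) =====
def Claim_equal_solution : Prop := ∀ (s : List String), Dom_solution s → Spec_solution s (solution s)

-- ===== LEMMAS AND PROOFS =====

-- `Free l`: l contains no occurrence of "110"
def Free (l : List Char) : Prop := ¬ ['1','1','0'] <:+: l

-- spec-level single push step of the stack reduction
def stepR (t : List Char) (c : Char) : List Char :=
  if ['1','1','0'] <:+ (t ++ [c]) then (t ++ [c]).dropLast.dropLast.dropLast else t ++ [c]

theorem infix_append_singleton {t : List Char} {c : Char} :
    ['1','1','0'] <:+: (t ++ [c]) ↔ ['1','1','0'] <:+: t ∨ ['1','1','0'] <:+ (t ++ [c]) := by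
  constructor
  · rintro ⟨a, b, hab⟩
    rcases List.eq_nil_or_concat b with rfl | ⟨b', x, rfl⟩
    · right; exact ⟨a, by simpa using hab⟩
    · left
      have h2 : (a ++ ['1','1','0'] ++ b') ++ [x] = t ++ [c] := by
        simpa [List.append_assoc] using hab
      have := congrArg List.dropLast h2
      simp only [List.dropLast_concat] at this
      exact ⟨a, b', this⟩
  · rintro (h | h)
    · exact h.trans (List.prefix_append t [c]).isInfix
    · exact h.isInfix

theorem suffix_last {x : List Char} (h : ['1','1','0'] <:+ x) : x.getLast? = some '0' := by
  rcases h with ⟨u, rfl⟩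
  simp

theorem stepR_not0 (t : List Char) (c : Char) (hc : c ≠ '0') : stepR t c = t ++ [c] := by
  unfold stepR
  rw [if_neg]
  intro h
  have := suffix_last h
  simp at this
  exact hc this

theorem stepR_pop (t : List Char) : stepR (t ++ ['1', '1']) '0' = t := by
  unfold stepR
  rw [if_pos ⟨t, by simp⟩]
  have h1 : (t ++ ['1','1']) ++ ['0'] = ((t ++ ['1']) ++ ['1']) ++ ['0'] := by simp
  rw [h1, List.dropLast_concat, List.dropLast_concat, List.dropLast_concat]

theorem stepR_free {t : List Char} (c : Char) (h : Free t) : Free (stepR t c) := by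
  unfold stepR
  split_ifs with hs
  · rw [List.dropLast_concat]
    intro hinf
    exact h (hinf.trans (List.dropLast_prefix _).isInfix |>.trans (List.dropLast_prefix _).isInfix)
  · intro hinf
    rcases infix_append_singleton.mp hinf with h' | h'
    · exact h h'
    · exact hs h'

theorem red_of_free : ∀ (l t : List Char), Free (t ++ l) → l.foldl stepR t = t ++ l := by
  intro l
  induction l with
  | nil => intro t _; simp
  | cons c l ih =>
    intro t hf
    have hstep : stepR t c = t ++ [c] := by
      unfold stepR
      rw [if_neg]
      intro hs
      exact hf (hs.isInfix.trans ⟨[], l, by simp⟩)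
    rw [List.foldl_cons, hstep, ih (t ++ [c]) (by simpa using hf)]
    simp

theorem red_skip (t b : List Char) :
    (['1','1','0'] ++ b).foldl stepR t = b.foldl stepR t := by
  have h1 : stepR t '1' = t ++ ['1'] := stepR_not0 t '1' (by decide)
  have h2 : stepR (t ++ ['1']) '1' = t ++ ['1','1'] := by
    rw [stepR_not0 _ '1' (by decide)]; simp
  have h3 : stepR (t ++ ['1','1']) '0' = t := stepR_pop t
  simp only [List.cons_append, List.nil_append, List.foldl_cons, h1, h2, h3]

theorem red_rep : ∀ (l t : List Char), l.foldl stepR t = (rep l).foldl stepR t := by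
  intro l
  induction l using rep.induct with
  | case1 => intro t; simp [rep]
  | case2 c t hp ih =>
    intro u
    rw [rep, if_pos hp]
    rcases hp with ⟨r, hr⟩
    have hdrop : (c :: t).drop 3 = r := by
      have := congrArg (List.drop 3) hr
      simpa using this.symm
    calc (c :: t).foldl stepR u = (['1','1','0'] ++ r).foldl stepR u := by rw [hr]
      _ = r.foldl stepR u := red_skip u r
      _ = ((c :: t).drop 3).foldl stepR u := by rw [hdrop]
      _ = (rep ((c :: t).drop 3)).foldl stepR u := ih u
  | case3 c t hp ih =>
    intro u
    rw [rep, if_neg hp]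
    simp only [List.foldl_cons]
    exact ih (stepR u c)

theorem rep_length_div3 : ∀ l : List Char, ∃ m : Nat, l.length = (rep l).length + 3 * m := by
  intro l
  induction l using rep.induct with
  | case1 => exact ⟨0, by simp [rep]⟩
  | case2 c t hp ih =>
    rcases ih with ⟨m, hm⟩
    refine ⟨m + 1, ?_⟩
    rw [rep, if_pos hp]
    rcases hp with ⟨r, hr⟩
    simp at hm ⊢
    have : t.length = r.length + 2 := by
      have := congrArg List.length hr
      simp at this
      omega
    omega
  | case3 c t hp ih =>
    rcases ih with ⟨m, hm⟩
    exact ⟨m, by rw [rep, if_neg hp]; simp; omega⟩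

theorem cond_iff (t : List Char) :
    (2 < t.length ∧ PySem.List.pyGet? t (-1) = some '0'
      ∧ PySem.List.pyGet? t (-2) = some '1' ∧ PySem.List.pyGet? t (-3) = some '1')
    ↔ ['1','1','0'] <:+ t := by
  constructor
  · rintro ⟨hlen, h1, h2, h3⟩
    rw [PySem.List.pyGet?_neg_ofNat t 1 (by omega) (by omega)] at h1
    rw [PySem.List.pyGet?_neg_ofNat t 2 (by omega) (by omega)] at h2
    rw [PySem.List.pyGet?_neg_ofNat t 3 (by omega) (by omega)] at h3
    refine ⟨t.take (t.length - 3), ?_⟩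
    have hd : t.drop (t.length - 3) = ['1','1','0'] := by
      apply List.ext_getElem?
      intro i
      rcases i with _ | _ | _ | i
      · rw [List.getElem?_drop]
        simpa [show t.length - 3 + 0 = t.length - 3 by omega] using h3
      · rw [List.getElem?_drop]
        simpa [show t.length - 3 + 1 = t.length - 2 by omega] using h2
      · rw [List.getElem?_drop]
        simpa [show t.length - 3 + 2 = t.length - 1 by omega] using h1
      · rw [List.getElem?_drop]
        rw [List.getElem?_eq_none (by omega), List.getElem?_eq_none (by simp only [List.length_cons, List.length_nil]; omega)]
    rw [← hd]
    exact List.take_append_drop _ t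
  · rintro ⟨u, rfl⟩
    have hlen : (u ++ ['1','1','0']).length = u.length + 3 := by simp
    refine ⟨by simp, ?_, ?_, ?_⟩
    · rw [PySem.List.pyGet?_neg_ofNat _ 1 (by omega) (by simp)]
      rw [hlen, show u.length + 3 - 1 = u.length + 2 by omega]
      rw [List.getElem?_append_right (by omega)]
      simp
    · rw [PySem.List.pyGet?_neg_ofNat _ 2 (by omega) (by simp)]
      rw [hlen, show u.length + 3 - 2 = u.length + 1 by omega]
      rw [List.getElem?_append_right (by omega)]
      simp
    · rw [PySem.List.pyGet?_neg_ofNat _ 3 (by omega) (by simp)]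
      rw [hlen, show u.length + 3 - 3 = u.length + 0 by omega]
      rw [List.getElem?_append_right (by omega)]
      simp

theorem popWhileA_of_free (t : List Char) (cnt : Int) (h : Free t) :
    popWhileA t cnt = (t, cnt) := by
  rw [popWhileA, dif_neg]
  intro hc
  exact h ((cond_iff t).mp hc).isInfix

theorem popWhileA_push (t : List Char) (c : Char) (cnt : Int) (h : Free t) :
    popWhileA (t ++ [c]) cnt
      = (stepR t c, if ['1','1','0'] <:+ (t ++ [c]) then cnt + 1 else cnt) := by
  by_cases hs : ['1','1','0'] <:+ (t ++ [c])
  · rw [popWhileA, dif_pos ((cond_iff _).mpr hs)]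
    rw [if_pos hs]
    have hfree : Free (t ++ [c]).dropLast.dropLast.dropLast := by
      rw [List.dropLast_concat]
      intro hinf
      exact h (hinf.trans ((List.dropLast_prefix _).isInfix.trans (List.dropLast_prefix _).isInfix))
    rw [popWhileA_of_free _ _ hfree]
    unfold stepR
    rw [if_pos hs]
  · rw [popWhileA, dif_neg (fun hc => hs ((cond_iff _).mp hc))]
    rw [if_neg hs, stepR, if_neg hs]

theorem suffix_len {t : List Char} {c : Char} (hs : ['1','1','0'] <:+ (t ++ [c])) :
    2 ≤ t.length := by
  rcases hs with ⟨u, hu⟩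
  have := congrArg List.length hu
  simp at this
  omega

theorem stepR_length (t : List Char) (c : Char) :
    ((stepR t c).length : Int)
      = if ['1','1','0'] <:+ (t ++ [c]) then (t.length : Int) - 2 else t.length + 1 := by
  unfold stepR
  split_ifs with hs
  · rw [List.dropLast_concat]
    have h2 := suffix_len hs
    simp [List.length_dropLast]
    omega
  · simp

theorem foldA_spec : ∀ (l t : List Char) (cnt : Int), Free t →
    (l.foldl (fun tc j => popWhileA (tc.1 ++ [j]) tc.2) (t, cnt)).1 = l.foldl stepR t
    ∧ 3 * (l.foldl (fun tc j => popWhileA (tc.1 ++ [j]) tc.2) (t, cnt)).2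
        + ((l.foldl stepR t).length : Int)
      = 3 * cnt + t.length + l.length := by
  intro l
  induction l with
  | nil => intro t cnt _; simp
  | cons c l ih =>
    intro t cnt h
    simp only [List.foldl_cons]
    rw [popWhileA_push t c cnt h]
    have hfree := stepR_free c h
    have hlen := stepR_length t c
    by_cases hs : ['1','1','0'] <:+ (t ++ [c])
    · rw [if_pos hs] at hlen ⊢
      rcases ih (stepR t c) (cnt + 1) hfree with ⟨h1, h2⟩
      refine ⟨h1, ?_⟩
      simp only [List.length_cons]
      push_cast at h2 ⊢
      omega
    · rw [if_neg hs] at hlen ⊢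
      rcases ih (stepR t c) cnt hfree with ⟨h1, h2⟩
      refine ⟨h1, ?_⟩
      simp only [List.length_cons]
      push_cast at h2 ⊢
      omega

theorem loopB_spec (l : List Char) (cnt : Int) :
    (loopB l cnt).1 = l.foldl stepR []
    ∧ 3 * (loopB l cnt).2 + ((l.foldl stepR []).length : Int) = 3 * cnt + l.length := by
  induction l, cnt using loopB.induct with
  | case1 l cnt h nw ih =>
    rw [loopB, dif_pos h]
    show (loopB nw (cnt + PySem.Int.floordiv ((l.length : Int) - (nw.length : Int)) 3)).1
          = l.foldl stepR []
      ∧ 3 * (loopB nw (cnt + PySem.Int.floordiv ((l.length : Int) - (nw.length : Int)) 3)).2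
          + ((l.foldl stepR []).length : Int) = 3 * cnt + l.length
    have hrep : nw = rep l := replace110_eq_rep l
    rcases rep_length_div3 l with ⟨m, hm⟩
    have hred : l.foldl stepR [] = nw.foldl stepR [] := by
      rw [hrep]; exact red_rep l []
    have hfd : PySem.Int.floordiv ((l.length : Int) - (nw.length : Int)) 3 = m := by
      have hv : ((l.length : Int) - (nw.length : Int)) = 3 * m := by
        rw [hrep]; omega
      rw [hv, PySem.Int.floordiv_eq_ediv_of_pos (by omega)]
      omega
    rcases ih with ⟨h1, h2⟩
    rw [hfd] at h1 h2 ⊢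
    refine ⟨by rw [h1, hred], ?_⟩
    rw [hred]
    have hlen : (nw.length : Int) = (l.length : Int) - 3 * m := by rw [hrep]; omega
    omega
  | case2 l cnt h =>
    rw [loopB, dif_neg h]
    have hfree : Free l := by
      intro hinf
      exact h ((PySem.Chars.isIn_iff_infix _ _).mpr hinf)
    have hred := red_of_free l [] (by simpa using hfree)
    rw [List.nil_append] at hred
    exact ⟨hred.symm, by rw [hred]⟩

theorem prefix0_iff (x : List Char) : ['0'].isPrefixOf x = true ↔ x.head? = some '0' := by
  cases x with
  | nil => rw [List.isPrefixOf_iff_prefix]; simp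
  | cons c t => rw [List.isPrefixOf_iff_prefix, List.cons_prefix_cons]; simp [eq_comm]

theorem pyRange_down_repr (m : Nat) :
    PySem.List.pyRange (m : Int) (-1) (-1)
      = (List.range (m + 1)).map (fun k : Nat => (m : Int) - (k : Int)) := by
  unfold PySem.List.pyRange
  rw [if_neg (by norm_num)]
  have h1 : ¬ ((0:Int) < -1) := by norm_num
  rw [if_neg h1, if_pos (by omega : (-1:Int) < m)]
  have h2 : (((m:Int) - (-1) + -(-1) - 1) / -(-1)).toNat = m + 1 := by norm_num
  rw [h2]
  apply List.map_congr_left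
  intro k _
  ring

theorem pyRange_down (m : Nat) :
    PySem.List.pyRange (m : Int) (-1) (-1) = (m : Int) :: PySem.List.pyRange ((m : Int) - 1) (-1) (-1) := by
  rcases m with _ | m
  · rw [pyRange_down_repr 0]
    have h0 : ((0:Nat):Int) - 1 = -1 := by norm_num
    rw [h0]
    unfold PySem.List.pyRange
    rw [if_neg (by norm_num), if_neg (by norm_num), if_neg (by norm_num)]
    simp
  · rw [pyRange_down_repr (m+1)]
    have h0 : ((m+1:Nat):Int) - 1 = (m : Int) := by push_cast; ring
    rw [h0, pyRange_down_repr m]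
    rw [show m + 1 + 1 = (m+1) + 1 from rfl, List.range_succ_eq_map]
    simp only [List.map_cons, List.map_map]
    refine congrArg₂ _ (by push_cast; ring) ?_
    apply List.map_congr_left
    intro k _
    simp only [Function.comp]
    push_cast
    ring

theorem rfind_go_zero (t : List Char) (sub : List Char) :
    PySem.Chars.rfind.go t sub 0 = if sub.isPrefixOf t then 0 else -1 := by
  simp [PySem.Chars.rfind.go]

theorem rfind_go_succ (t sub : List Char) (j : Nat) :
    PySem.Chars.rfind.go t sub (j + 1)
      = if sub.isPrefixOf (t.drop (j + 1)) then ((j : Int) + 1) else PySem.Chars.rfind.go t sub j := by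
  rw [PySem.Chars.rfind.go]
  push_cast
  rfl

theorem find0A_bridge (t : List Char) : ∀ m : Nat,
    find0A t (PySem.List.pyRange (m : Int) (-1) (-1))
      = (if PySem.Chars.rfind.go t ['0'] m = -1 then none
         else some (PySem.Chars.rfind.go t ['0'] m + 1)) := by
  intro m
  induction m with
  | zero =>
    rw [pyRange_down 0, Nat.cast_zero]
    have hempty : PySem.List.pyRange ((0:Int) - 1) (-1) (-1) = [] := by decide
    rw [hempty]
    rw [rfind_go_zero]
    show (if PySem.List.pyGet? t 0 = some '0' then some (0 + 1) else none) = _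
    have hc : PySem.List.pyGet? t 0 = t[0]? := PySem.List.pyGet?_zero t
    have hp : (['0'].isPrefixOf t = true) ↔ t[0]? = some '0' := by
      rw [prefix0_iff, List.head?_eq_getElem?]
    by_cases h0 : t[0]? = some '0'
    · rw [if_pos (by rw [hc]; exact h0), if_pos (hp.mpr h0)]
      rw [if_neg (by norm_num)]
    · rw [if_neg (by rw [hc]; exact h0)]
      have hb : ¬ (['0'].isPrefixOf t = true) := fun hb => h0 (hp.mp hb)
      rw [if_neg hb, if_pos rfl]
  | succ m ih =>
    have hcast : ((m + 1 : Nat) : Int) - 1 = (m : Int) := by push_cast; ring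
    rw [pyRange_down (m + 1), hcast]
    show (if PySem.List.pyGet? t ((m+1 : Nat) : Int) = some '0'
            then some (((m+1 : Nat) : Int) + 1)
            else find0A t (PySem.List.pyRange (m : Int) (-1) (-1))) = _
    rw [rfind_go_succ]
    have hc : PySem.List.pyGet? t ((m+1 : Nat) : Int) = t[m+1]? := PySem.List.pyGet?_natCast t (m+1)
    have hp : (['0'].isPrefixOf (t.drop (m+1)) = true) ↔ t[m+1]? = some '0' := by
      rw [prefix0_iff, List.head?_drop]
    by_cases h0 : t[m+1]? = some '0'
    · rw [if_pos (by rw [hc]; exact h0), if_pos (hp.mpr h0)]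
      rw [if_neg (by omega)]
      push_cast
      ring_nf
    · rw [if_neg (by rw [hc]; exact h0), if_neg (fun hb => h0 (hp.mp hb))]
      exact ih

theorem slice_zero_to (r : List Char) : PySem.List.slice r none (some 0) = [] := by
  simp [PySem.List.slice, PySem.List.clampIdx]

theorem rfind_eq_go_pred (r : List Char) (h : r ≠ []) :
    PySem.Chars.rfind r ['0'] = PySem.Chars.rfind.go r ['0'] (r.length - 1) := by
  unfold PySem.Chars.rfind
  obtain ⟨n, hn⟩ : ∃ n, r.length = n + 1 := ⟨r.length - 1, by
    have := List.length_pos_iff.mpr h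
    omega⟩
  have hpre : ¬ (['0'].isPrefixOf (r.drop (n + 1)) = true) := by
    rw [List.drop_of_length_le (by omega)]
    simp [List.isPrefixOf]
  rw [hn, rfind_go_succ, if_neg hpre]
  norm_num

theorem splice_eq (r : List Char) (cnt : Int) : spliceA r cnt = spliceB r cnt := by
  have eB : spliceB r cnt
      = String.ofList (PySem.List.slice r none (some (PySem.Chars.rfind r ['0'] + 1))
        ++ PySem.List.pyRepeat ['1','1','0'] cnt
        ++ PySem.List.slice r (some (PySem.Chars.rfind r ['0'] + 1)) none) := rfl
  rcases List.eq_nil_or_concat r with hnil | ⟨r', x, hcons⟩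
  · subst hnil
    have eA : spliceA [] cnt = String.ofList (PySem.List.pyRepeat ['1','1','0'] cnt ++ []) := rfl
    rw [eA, eB]
    have h2 : PySem.Chars.rfind ([]:List Char) ['0'] = -1 := by decide
    rw [h2]
    norm_num
    simp [slice_zero_to]
  · have hne : r ≠ [] := by rw [hcons]; simp
    have hlen1 : 1 ≤ r.length := List.length_pos_iff.mpr hne
    have hcast : ((r.length : Int) - 1) = ((r.length - 1 : Nat) : Int) := by push_cast [hlen1]; ring
    have eA : spliceA r cnt
        = match find0A r (PySem.List.pyRange ((r.length : Int) - 1) (-1) (-1)) with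
          | none => String.ofList (PySem.List.pyRepeat ['1','1','0'] cnt ++ r)
          | some idx =>
              String.ofList (PySem.List.slice r none (some idx)
                ++ PySem.List.pyRepeat ['1','1','0'] cnt ++ PySem.List.slice r (some idx) none) := rfl
    rw [eA, eB, hcast, find0A_bridge r (r.length - 1), rfind_eq_go_pred r hne]
    set g := PySem.Chars.rfind.go r ['0'] (r.length - 1) with hg
    by_cases hgm : g = -1
    · rw [if_pos hgm, hgm]
      norm_num
      simp [slice_zero_to]
    · rw [if_neg hgm]

theorem process_eq (i : String) : processA i = processB i := by
  rcases foldA_spec i.toList [] 0 (by rintro ⟨a, b, hab⟩; simp at hab) with ⟨hA1, hA2⟩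
  rcases loopB_spec i.toList 0 with ⟨hB1, hB2⟩
  have eA : processA i
      = spliceA (i.toList.foldl (fun tc j => popWhileA (tc.1 ++ [j]) tc.2) (([] : List Char), (0:Int))).1
               (i.toList.foldl (fun tc j => popWhileA (tc.1 ++ [j]) tc.2) (([] : List Char), (0:Int))).2 := rfl
  have eB : processB i = spliceB (loopB i.toList 0).1 (loopB i.toList 0).2 := rfl
  simp only [List.length_nil, Nat.cast_zero] at hA2 hB2
  have hcnt : (i.toList.foldl (fun tc j => popWhileA (tc.1 ++ [j]) tc.2) (([] : List Char), (0:Int))).2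
      = (loopB i.toList 0).2 := by omega
  rw [eA, eB, hA1, hB1, hcnt, splice_eq]

theorem solution_eq (s : List String) : solution s = solution_alt s := by
  unfold solution solution_alt
  rw [PySem.List.foldl_append_singleton_eq_map, PySem.List.foldl_append_singleton_eq_map]
  simp [process_eq]

-- ===== VERDICT (by name: the statement is the Claim_ definition above) =====
theorem solution_spec : Claim_equal_solution := by
  intro s _
  unfold Spec_solution
  exact solution_eq s
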